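-- pv_equiv track=rewrite | github.com/ayashrath/analyze-whatsapp-chat | whatsapp-analyse/operations.py | count_link_list
-- ===== SOURCE A (Python) =====
-- TOP_SITES: dict[str, list[str]] = {
--     "YouTube": ["youtube.", "youtu.be"],
--     "Google": ["google.", "goog.le", "g.co"],
--     "Wikipedia": ["wikipedia."],
--     "Meta's Sites": ["facebook.com", "fb.com", "instagram.com", "instagr.am", "whatsapp.com"],
--     "Reddit": ["reddit.com"],
--     "Twitter": ["twitter.com"],
--     "Amazon": ["amazon."],
--     "Yandex": ["yandex.ru"],
--     "TicTok": ["tiktok."],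
--     "Bilibili": ["bilibili.com"],
--     "News": ["cnn.com", "bbc.", "msn.com"],
-- }  # ending with . for some sites as, sites like YouTube have multiple domain names
--
-- def count_link_list(link_lst: list[str]) -> dict[str, list[str]]:
--     """
--     Give count analysis of the link when list of links is passed through
--     Uses user_defined dict for categorisation
--     Uses top sites that people are most probably going to share
--     """
--
--     output_dict: dict[str, list[str]]
--     output_dict = {}
--
--     for link in link_lst:
--         site_added: bool = False
--         for site in TOP_SITES:
--             if site_added:
--                 break
--             for identifier in TOP_SITES[site]:
--                 if identifier in link and not site_added:
--                     output_dict[site] = output_dict.get(site, []) + [link]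
--                     site_added = True
--                     break
--         if not site_added and link not in output_dict.get("Uncategorised", []):
--             output_dict["Uncategorised"] = output_dict.get("Uncategorised", []) + [link]
--
--     return output_dict
-- ===== SOURCE B (Python) =====
-- TOP_SITES: dict[str, list[str]] = {
--     "YouTube": ["youtube.", "youtu.be"],
--     "Google": ["google.", "goog.le", "g.co"],
--     "Wikipedia": ["wikipedia."],
--     "Meta's Sites": ["facebook.com", "fb.com", "instagram.com", "instagr.am", "whatsapp.com"],
--     "Reddit": ["reddit.com"],
--     "Twitter": ["twitter.com"],
--     "Amazon": ["amazon."],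
--     "Yandex": ["yandex.ru"],
--     "TicTok": ["tiktok."],
--     "Bilibili": ["bilibili.com"],
--     "News": ["cnn.com", "bbc.", "msn.com"],
-- }
--
--
-- def count_link_list(link_lst: list[str]) -> dict[str, list[str]]:
--     # Stage 1 (site-major): sweep the sites in dict order over the whole link
--     # list, recording in an assignment table the first site that claims each link.
--     assigned: list = [None] * len(link_lst)
--     for site, idents in TOP_SITES.items():
--         for i, link in enumerate(link_lst):
--             if assigned[i] is None and any(ident in link for ident in idents):
--                 assigned[i] = site
--     # Stage 2: one pass over the links in original order builds the buckets,
--     # deduplicating only the unclaimed ("Uncategorised") links.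
--     output: dict[str, list[str]] = {}
--     for link, site in zip(link_lst, assigned):
--         if site is None:
--             bucket = output.get("Uncategorised", [])
--             if link not in bucket:
--                 output["Uncategorised"] = bucket + [link]
--         else:
--             output[site] = output.get(site, []) + [link]
--     return output
-- ===== Notes on version B (the rewrite author's own statement) =====
-- stated objective: alternative
-- what changed: Replaces A's per-link triple-nested scan with a break flag by two staged passes: a site-major sweep that fills an assignment table (first site in dict order claims each link), then one pass over the links building the buckets from that table.
import Mathlib
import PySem

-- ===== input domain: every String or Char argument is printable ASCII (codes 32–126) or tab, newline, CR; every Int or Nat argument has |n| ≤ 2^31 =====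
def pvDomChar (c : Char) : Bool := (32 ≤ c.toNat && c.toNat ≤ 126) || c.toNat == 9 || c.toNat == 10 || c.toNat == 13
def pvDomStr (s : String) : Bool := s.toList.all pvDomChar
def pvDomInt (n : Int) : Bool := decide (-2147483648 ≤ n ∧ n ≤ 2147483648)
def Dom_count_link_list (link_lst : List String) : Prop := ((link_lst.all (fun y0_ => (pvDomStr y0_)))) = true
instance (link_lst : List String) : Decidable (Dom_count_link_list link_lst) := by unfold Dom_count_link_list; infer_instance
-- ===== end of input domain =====

-- B replaces A's per-link nested scan with a site-major assignment-table pass plus one bucket-building pass (objective: alternative).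

def TOP_SITES : List (String × List String) :=
  [("YouTube", ["youtube.", "youtu.be"]),
   ("Google", ["google.", "goog.le", "g.co"]),
   ("Wikipedia", ["wikipedia."]),
   ("Meta's Sites", ["facebook.com", "fb.com", "instagram.com", "instagr.am", "whatsapp.com"]),
   ("Reddit", ["reddit.com"]),
   ("Twitter", ["twitter.com"]),
   ("Amazon", ["amazon."]),
   ("Yandex", ["yandex.ru"]),
   ("TicTok", ["tiktok."]),
   ("Bilibili", ["bilibili.com"]),
   ("News", ["cnn.com", "bbc.", "msn.com"])]

-- ===== PORT A =====
-- 'for site in TOP_SITES' with 'TOP_SITES[site]': iterating the (key, value) pairs; the value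
-- looked up for each key is exactly the paired value (the literal dict's keys are distinct).
def count_link_list (link_lst : List String) : List (String × List String) :=
  (link_lst.foldl (fun (output_dict : PySem.Dict String (List String)) link =>
      -- site_added flag threaded through both inner loops; 'break' = flag makes the rest skip
      let st := TOP_SITES.foldl
        (fun (st : PySem.Dict String (List String) × Bool) p =>
          if st.2 then st  -- 'if site_added: break'
          else p.2.foldl
            (fun (st2 : PySem.Dict String (List String) × Bool) identifier =>
              if PySem.Str.isIn identifier link && !st2.2 then
                (st2.1.insert p.1 (st2.1.getD p.1 [] ++ [link]), true)
              else st2) st)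
        (output_dict, false)
      if !st.2 && !((st.1.getD "Uncategorised" []).contains link) then
        st.1.insert "Uncategorised" (st.1.getD "Uncategorised" [] ++ [link])
      else st.1)
    PySem.Dict.empty).items

-- ===== PORT B =====
-- Stage 1: site-major sweep filling the assignment table (the per-index in-place update of
-- 'assigned' is rendered as the map over link/assignment pairs, each entry updated independently).
-- Stage 2: one pass over zip(link_lst, assigned) building the buckets.
def count_link_list_alt (link_lst : List String) : List (String × List String) :=
  let assigned0 : List (Option String) := link_lst.map (fun _ => (none : Option String))
  let assigned := TOP_SITES.foldl
    (fun (asg : List (Option String)) p =>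
      (link_lst.zip asg).map (fun q =>
        if q.2.isNone && p.2.any (fun ident => PySem.Str.isIn ident q.1) then some p.1 else q.2))
    assigned0
  ((link_lst.zip assigned).foldl
    (fun (output : PySem.Dict String (List String)) q =>
      match q.2 with
      | none =>
        let bucket := output.getD "Uncategorised" []
        if !(bucket.contains q.1) then output.insert "Uncategorised" (bucket ++ [q.1]) else output
      | some site => output.insert site (output.getD site [] ++ [q.1]))
    PySem.Dict.empty).items

-- ===== PRECONDITION & SPEC =====
def Spec_count_link_list (link_lst : List String) (out : List (String × List String)) : Prop := out = count_link_list_alt link_lst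
instance (link_lst : List String) (out : List (String × List String)) : Decidable (Spec_count_link_list link_lst out) := by unfold Spec_count_link_list; infer_instance

-- ===== CLAIM (what is proved, stated in full; the proofs are below) =====
def Claim_equal_count_link_list : Prop := ∀ (link_lst : List String), Dom_count_link_list link_lst → Spec_count_link_list link_lst (count_link_list link_lst)

-- ===== LEMMAS AND PROOFS =====

-- zipping a list with a map of itself pairs each element with its image
theorem zip_self_map {A B : Type} (l : List A) (f : A → B) :
    l.zip (l.map f) = l.map (fun x => (x, f x)) := by
  induction l with
  | nil => rfl
  | cons a t ih => simp [ih]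

-- the classification both sides compute: first site (in TOP_SITES order) with a matching identifier
def cls (link : String) : Option String :=
  (TOP_SITES.find? (fun p => p.2.any (fun ident => PySem.Str.isIn ident link))).map Prod.fst

-- once the flag is true, A's identifier loop does nothing
theorem inner_flag_true (q : String → Bool) (link : String) (site : String) (idents : List String)
    (d : PySem.Dict String (List String)) :
    idents.foldl
      (fun (st2 : PySem.Dict String (List String) × Bool) identifier =>
        if q identifier && !st2.2 then
          (st2.1.insert site (st2.1.getD site [] ++ [link]), true)
        else st2) (d, true) = (d, true) := by
  induction idents with
  | nil => rfl
  | cons i t ih => simpa using ih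

-- A's identifier loop from a false flag: updates iff some identifier matches
theorem inner_loop_eq (q : String → Bool) (link : String) (site : String) (idents : List String)
    (d : PySem.Dict String (List String)) :
    idents.foldl
      (fun (st2 : PySem.Dict String (List String) × Bool) identifier =>
        if q identifier && !st2.2 then
          (st2.1.insert site (st2.1.getD site [] ++ [link]), true)
        else st2) (d, false)
      = if idents.any (q) then
          (d.insert site (d.getD site [] ++ [link]), true)
        else (d, false) := by
  induction idents with
  | nil => rfl
  | cons i t ih =>
    by_cases h : q i = true
    · simp only [List.foldl_cons, List.any_cons, h, Bool.not_false, Bool.and_true,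
        Bool.true_or, if_true]
      exact inner_flag_true q link site t _
    · simp only [Bool.not_eq_true] at h
      simp only [List.foldl_cons, List.any_cons, h, Bool.false_and, Bool.false_or,
        Bool.false_eq_true, if_false]
      exact ih

-- once the flag is true, A's site loop does nothing
theorem outer_flag_true (q : String → Bool) (link : String) (sites : List (String × List String))
    (d : PySem.Dict String (List String)) :
    sites.foldl
      (fun (st : PySem.Dict String (List String) × Bool) p =>
        if st.2 then st
        else p.2.foldl
          (fun (st2 : PySem.Dict String (List String) × Bool) identifier =>
            if q identifier && !st2.2 then
              (st2.1.insert p.1 (st2.1.getD p.1 [] ++ [link]), true)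
            else st2) st) (d, true) = (d, true) := by
  induction sites with
  | nil => rfl
  | cons p t ih => simp only [List.foldl_cons, if_true]; exact ih

-- A's site loop = first matching site (find?) updates the dict
theorem outer_loop_eq (q : String → Bool) (link : String) (sites : List (String × List String))
    (d : PySem.Dict String (List String)) :
    sites.foldl
      (fun (st : PySem.Dict String (List String) × Bool) p =>
        if st.2 then st
        else p.2.foldl
          (fun (st2 : PySem.Dict String (List String) × Bool) identifier =>
            if q identifier && !st2.2 then
              (st2.1.insert p.1 (st2.1.getD p.1 [] ++ [link]), true)
            else st2) st) (d, false)
      = match sites.find? (fun p => p.2.any (q)) with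
        | some p => (d.insert p.1 (d.getD p.1 [] ++ [link]), true)
        | none => (d, false) := by
  induction sites with
  | nil => rfl
  | cons p t ih =>
    by_cases h : p.2.any (q) = true
    · rw [List.find?_cons_of_pos (by simpa using h)]
      simp only [List.foldl_cons, Bool.false_eq_true, if_false, inner_loop_eq, h, if_true]
      exact outer_flag_true q link t _
    · rw [List.find?_cons_of_neg (by simpa using h)]
      simp only [List.foldl_cons, Bool.false_eq_true, if_false, inner_loop_eq, h]
      exact ih

-- B's stage-1 fold starting from any pointwise assignment: the first claiming site
-- in 'sites' fills each still-unassigned entry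
theorem assign_fold_eq (link_lst : List String) (sites : List (String × List String))
    (f : String → Option String) :
    sites.foldl
      (fun (asg : List (Option String)) p =>
        (link_lst.zip asg).map (fun q =>
          if q.2.isNone && p.2.any (fun ident => PySem.Str.isIn ident q.1) then some p.1 else q.2))
      (link_lst.map f)
    = link_lst.map (fun l =>
        match f l with
        | some s => some s
        | none => (sites.find? (fun p => p.2.any (fun ident => PySem.Str.isIn ident l))).map Prod.fst) := by
  induction sites generalizing f with
  | nil =>
    simp only [List.foldl_nil, List.find?_nil, Option.map_none]
    apply List.map_congr_left
    intro l _
    cases f l <;> rfl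
  | cons p t ih =>
    simp only [List.foldl_cons]
    rw [zip_self_map, List.map_map]
    have hstep :
        ((fun q : String × Option String =>
            if q.2.isNone && p.2.any (fun ident => PySem.Str.isIn ident q.1) then some p.1 else q.2)
          ∘ fun l => (l, f l))
        = fun l => if (f l).isNone && p.2.any (fun ident => PySem.Str.isIn ident l) then some p.1 else f l := by
      funext l; rfl
    rw [hstep, ih]
    apply List.map_congr_left
    intro l _
    cases hf : f l with
    | some s => simp only [Option.isNone_some, Bool.false_and, Bool.false_eq_true, if_false]
    | none =>
      by_cases h : p.2.any (fun ident => PySem.Str.isIn ident l) = true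
      · rw [List.find?_cons_of_pos (by simpa using h)]
        simp only [Option.isNone_none, Bool.true_and, h, if_true, Option.map_some]
      · rw [List.find?_cons_of_neg (by simpa using h)]
        simp only [Bool.not_eq_true] at h
        simp only [Option.isNone_none, Bool.true_and, h, Bool.false_eq_true, if_false]

-- per-link step of A's fold, reduced to the classification
theorem stepA_eq (d : PySem.Dict String (List String)) (link : String) :
    (let st := TOP_SITES.foldl
        (fun (st : PySem.Dict String (List String) × Bool) p =>
          if st.2 then st
          else p.2.foldl
            (fun (st2 : PySem.Dict String (List String) × Bool) identifier =>
              if PySem.Str.isIn identifier link && !st2.2 then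
                (st2.1.insert p.1 (st2.1.getD p.1 [] ++ [link]), true)
              else st2) st)
        (d, false)
      if !st.2 && !((st.1.getD "Uncategorised" []).contains link) then
        st.1.insert "Uncategorised" (st.1.getD "Uncategorised" [] ++ [link])
      else st.1)
    = match cls link with
      | none =>
        if !((d.getD "Uncategorised" []).contains link) then
          d.insert "Uncategorised" (d.getD "Uncategorised" [] ++ [link])
        else d
      | some site => d.insert site (d.getD site [] ++ [link]) := by
  simp only [outer_loop_eq, cls]
  cases hf : TOP_SITES.find? (fun p => p.2.any (fun ident => PySem.Str.isIn ident link)) with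
  | none => by_cases hc : (d.getD "Uncategorised" []).contains link = true <;> simp
  | some p => simp

-- ===== VERDICT (by name: the statement is the Claim_ definition above) =====
theorem count_link_list_spec : Claim_equal_count_link_list := by
  intro link_lst _
  unfold Spec_count_link_list count_link_list count_link_list_alt
  have hassign := assign_fold_eq link_lst TOP_SITES (fun _ => none)
  simp only [] at hassign ⊢
  rw [hassign]
  have hz : link_lst.zip (link_lst.map (fun l =>
      match (none : Option String) with
      | some s => some s
      | none => (TOP_SITES.find? (fun p => p.2.any (fun ident => PySem.Str.isIn ident l))).map Prod.fst))
      = link_lst.map (fun l => (l, cls l)) := by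
    rw [zip_self_map]
    rfl
  rw [hz, List.foldl_map]
  congr 2
  funext d link
  have := stepA_eq d link
  simp only [] at this
  rw [this]
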